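-- pv_equiv track=rewrite | github.com/IzmailovES/euler_project | problem69.py | separate_dubles
-- ===== SOURCE A (Python) =====
-- def separate_dubles(l):
--     ret = [1 for _ in range(len(l))]
--     p = 0
--     el = l[p]
--     for i in l:
--         if i == el:
--             ret[p] *= el
--         else:
--             el = i
--             p += 1
--             ret[p] *= el
--     return ret #[x for x in ret if x != 1]
-- ===== SOURCE B (Python) =====
-- def separate_dubles(l):
--     # Groupby-style: an outer loop walks run start indices, an inner scan finds
--     # each run's end, emit value ** run_length per run, pad with 1s once.
--     out = []
--     i = 0
--     n = len(l)
--     while i < n: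
--         j = i + 1
--         while j < n and l[j] == l[i]:
--             j += 1
--         out.append(l[i] ** (j - i))
--         i = j
--     return out + [1] * (n - len(out))
-- ===== Notes on version B (the rewrite author's own statement) =====
-- stated objective: alternative
-- what changed: B replaces A's single elementwise pass that multiplies into a preallocated ones-array through a run pointer by a groupby-style scan: an outer loop over run-start indices, an inner scan finding each run's end, value ** run_length emitted per run, and one final padding with 1s.
import Mathlib
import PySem

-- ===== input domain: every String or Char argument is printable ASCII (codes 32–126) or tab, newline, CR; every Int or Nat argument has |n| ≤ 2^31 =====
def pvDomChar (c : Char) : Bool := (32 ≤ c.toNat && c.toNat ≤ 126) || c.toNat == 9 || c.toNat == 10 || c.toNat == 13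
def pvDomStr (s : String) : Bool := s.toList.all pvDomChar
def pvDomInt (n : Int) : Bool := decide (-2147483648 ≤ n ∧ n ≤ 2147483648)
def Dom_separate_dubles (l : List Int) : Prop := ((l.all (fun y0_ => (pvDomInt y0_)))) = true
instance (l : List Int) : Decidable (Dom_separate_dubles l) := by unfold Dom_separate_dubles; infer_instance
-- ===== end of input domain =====

-- B replaces A's elementwise pass over a preallocated ones-array (run pointer, in-place
-- multiply) by a groupby-style index scan: outer loop over run starts, inner scan to the
-- run's end, value ^ run_length per run, one final padding with 1s (alternative, same cost).

-- ===== PORT A =====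
-- step of A's 'for i in l' loop; state = (ret, p, el); indices p / p+1 are always
-- in range (p < number of runs so far ≤ len(l)), so getD/set are exact here
def pvStepA (st : List Int × Nat × Int) (i : Int) : List Int × Nat × Int :=
  let (ret, p, el) := st
  if i = el then (ret.set p ((ret.getD p 1) * el), p, el)
  else (ret.set (p + 1) ((ret.getD (p + 1) 1) * i), p + 1, i)

def separate_dubles (l : List Int) : List Int :=
  match l with
  | [] => []  -- Python raises IndexError on l[0] here; excluded by Pre_
  | x :: _ => (l.foldl pvStepA (List.replicate l.length 1, 0, x)).1

-- ===== PORT B =====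
-- inner 'while j < n and l[j] == l[i]' scan of B; j stays in range, so getD is exact;
-- fuel only makes the recursion structural (it is never exhausted when fuel + j ≥ n)
def pvInnerB (l : List Int) (hd : Int) : Nat → Nat → Nat
  | 0, j => j
  | fuel + 1, j => if j < l.length ∧ l.getD j 0 = hd then pvInnerB l hd fuel (j + 1) else j

-- outer 'while i < n' loop of B; accumulates the run products, pads at the end
def pvOuterB (l : List Int) : Nat → List Int → Nat → List Int
  | 0, out, _ => out ++ List.replicate (l.length - out.length) 1
  | fuel + 1, out, i =>
    if i < l.length then
      let j := pvInnerB l (l.getD i 0) l.length (i + 1)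
      pvOuterB l fuel (out ++ [(l.getD i 0) ^ (j - i)]) j
    else out ++ List.replicate (l.length - out.length) 1

def separate_dubles_alt (l : List Int) : List Int := pvOuterB l (l.length + 1) [] 0

-- ===== PRECONDITION & SPEC =====
-- Pre_ excludes only the empty list, on which A raises IndexError (l[0]).
def Pre_separate_dubles (l : List Int) : Prop := l ≠ []
instance (l : List Int) : Decidable (Pre_separate_dubles l) := by unfold Pre_separate_dubles; infer_instance
def pvWitness_separate_dubles : List Int := [1, 2, 2, 3]

def Spec_separate_dubles (l : List Int) (out : List Int) : Prop := out = separate_dubles_alt l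
instance (l : List Int) (out : List Int) : Decidable (Spec_separate_dubles l out) := by unfold Spec_separate_dubles; infer_instance

-- ===== CLAIM (what is proved, stated in full; the proofs are below) =====
def Claim_equal_separate_dubles : Prop := ∀ (l : List Int), Dom_separate_dubles l → Pre_separate_dubles l → Spec_separate_dubles l (separate_dubles l)

-- ===== LEMMAS AND PROOFS =====

-- canonical run decomposition: the list of run products, in order
def pvSpec : List Int → List Int
  | [] => []
  | a :: t =>
      a ^ ((t.takeWhile (fun x => x = a)).length + 1) ::
        pvSpec (t.dropWhile (fun x => x = a))
termination_by l => l.length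
decreasing_by
  simpa using Nat.lt_succ_of_le (List.length_dropWhile_le _ t)

lemma pvSpec_nil : pvSpec [] = [] := by rw [pvSpec]

lemma drop_length_takeWhile (p : Int → Bool) (xs : List Int) :
    xs.drop (xs.takeWhile p).length = xs.dropWhile p := by
  induction xs with
  | nil => simp
  | cons a t ih =>
    by_cases hp : p a
    · simp [hp, ih]
    · simp [hp]

-- step of A's run-merge reformulation, used only as a proof intermediate
def pvStepB (st : List Int × Option Int) (x : Int) : List Int × Option Int :=
  let (prods, prev) := st
  if prods ≠ [] ∧ prev = some x then
    (prods.dropLast ++ [(prods.getLast?).getD 1 * x], some x)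
  else
    (prods ++ [x], some x)

lemma getD_append_last (p : List Int) (k : Nat) (h : p ≠ []) :
    (p ++ List.replicate k (1:Int)).getD (p.length - 1) 1 = (p.getLast?).getD 1 := by
  induction p with
  | nil => simp at h
  | cons a t ih =>
    cases t with
    | nil => simp
    | cons b t' =>
      have := ih (by simp)
      simpa [List.getD, List.getLast?_cons_cons] using this

lemma set_append_last (p : List Int) (k : Nat) (v : Int) (h : p ≠ []) :
    (p ++ List.replicate k (1:Int)).set (p.length - 1) v
      = (p.dropLast ++ [v]) ++ List.replicate k 1 := by
  induction p with
  | nil => simp at h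
  | cons a t ih =>
    cases t with
    | nil => simp
    | cons b t' =>
      have := ih (by simp)
      simpa [List.set, List.dropLast_cons_of_ne_nil] using this

lemma getD_append_next (p : List Int) (k : Nat) (hk : 0 < k) :
    (p ++ List.replicate k (1:Int)).getD p.length 1 = 1 := by
  cases k with
  | zero => omega
  | succ k' => simp [List.replicate_succ]

lemma set_append_next (p : List Int) (k : Nat) (v : Int) (hk : 0 < k) :
    (p ++ List.replicate k (1:Int)).set p.length v
      = (p ++ [v]) ++ List.replicate (k - 1) 1 := by
  cases k with
  | zero => omega
  | succ k' =>
    simp [List.replicate_succ, List.set_append_right, List.append_assoc]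

lemma dropLast_append_getLast (p : List Int) (h : p ≠ []) :
    p.dropLast ++ [(p.getLast?).getD 1] = p := by
  induction p with
  | nil => simp at h
  | cons a t ih =>
    cases t with
    | nil => simp
    | cons b t' =>
      have := ih (by simp)
      simpa [List.dropLast_cons_of_ne_nil, List.getLast?_cons_cons] using this

-- A's element loop equals the run-merge fold (pvStepB) plus padding
lemma loop_rel (rest : List Int) : ∀ (prods : List Int) (k : Nat) (el : Int),
    prods ≠ [] → rest.length ≤ k →
    (rest.foldl pvStepA (prods ++ List.replicate k 1, prods.length - 1, el)).1
      = (rest.foldl pvStepB (prods, some el)).1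
        ++ List.replicate (prods.length + k - (rest.foldl pvStepB (prods, some el)).1.length) 1 := by
  induction rest with
  | nil =>
    intro prods k el hne hk
    simp
  | cons x rest ih =>
    intro prods k el hne hk
    by_cases hx : x = el
    · -- same run: both update the last product
      subst hx
      have hB : pvStepB (prods, some x) x
          = (prods.dropLast ++ [(prods.getLast?).getD 1 * x], some x) := by
        simp [pvStepB, hne]
      have hA : pvStepA (prods ++ List.replicate k 1, prods.length - 1, x) x
          = ((prods.dropLast ++ [(prods.getLast?).getD 1 * x]) ++ List.replicate k 1,
             prods.length - 1, x) := by
        simp only [pvStepA]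
        rw [getD_append_last _ _ hne, set_append_last _ _ _ hne]
        simp
      have hlen : (prods.dropLast ++ [(prods.getLast?).getD 1 * x]).length = prods.length := by
        cases prods with
        | nil => simp at hne
        | cons a t => simp [List.length_dropLast]
      have hne' : prods.dropLast ++ [(prods.getLast?).getD 1 * x] ≠ [] := by simp
      have := ih (prods.dropLast ++ [(prods.getLast?).getD 1 * x]) k x hne'
        (by simpa using Nat.le_of_succ_le hk)
      simp only [List.foldl_cons, hA, hB]
      rw [show (prods.length - 1) = ((prods.dropLast ++ [(prods.getLast?).getD 1 * x]).length - 1) by rw [hlen]]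
      rw [this]
      rw [hlen]
    · -- new run: A moves the pointer, B appends
      have hkpos : 0 < k := by
        have : 0 < (x :: rest).length := by simp
        omega
      have hB : pvStepB (prods, some el) x = (prods ++ [x], some x) := by
        simp [pvStepB]
        intro _ h
        exact absurd h.symm hx
      have hp1 : prods.length - 1 + 1 = prods.length := by
        cases prods with
        | nil => simp at hne
        | cons a t => simp
      have hA : pvStepA (prods ++ List.replicate k 1, prods.length - 1, el) x
          = ((prods ++ [x]) ++ List.replicate (k - 1) 1, prods.length, x) := by
        simp only [pvStepA, if_neg hx, hp1]
        rw [getD_append_next _ _ hkpos, set_append_next _ _ _ hkpos, one_mul]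
      have hne' : prods ++ [x] ≠ [] := by simp
      have := ih (prods ++ [x]) (k - 1) x hne'
        (by simp at hk ⊢; omega)
      simp only [List.foldl_cons, hA, hB]
      rw [show prods.length = (prods ++ [x]).length - 1 by simp]
      rw [this]
      have : (prods ++ [x]).length + (k - 1) = prods.length + k := by
        simp; omega
      rw [this]
      have hfix : (prods ++ [x]).length - 1 + k = prods.length + k := by simp
      rw [hfix]

-- the run-merge fold computes the canonical run products
lemma fold_pvStepB_spec (t : List Int) : ∀ (prods : List Int) (a : Int), prods ≠ [] →
    (t.foldl pvStepB (prods, some a)).1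
      = prods.dropLast
        ++ [(prods.getLast?).getD 1 * a ^ (t.takeWhile (fun x => x = a)).length]
        ++ pvSpec (t.dropWhile (fun x => x = a)) := by
  induction t with
  | nil =>
    intro prods a hne
    have h0 : pvSpec [] = [] := by rw [pvSpec]
    simp only [List.foldl_nil, List.takeWhile_nil, List.dropWhile_nil, List.length_nil,
      pow_zero, mul_one, h0, List.append_nil]
    exact (dropLast_append_getLast prods hne).symm
  | cons x t ih =>
    intro prods a hne
    by_cases hx : x = a
    · subst hx
      have hB : pvStepB (prods, some x) x
          = (prods.dropLast ++ [(prods.getLast?).getD 1 * x], some x) := by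
        simp [pvStepB, hne]
      have hne' : prods.dropLast ++ [(prods.getLast?).getD 1 * x] ≠ [] := by simp
      have := ih (prods.dropLast ++ [(prods.getLast?).getD 1 * x]) x hne'
      simp only [List.foldl_cons, hB] at *
      rw [this]
      simp [pow_succ, mul_assoc, mul_comm]
      ring
    · have hB : pvStepB (prods, some a) x = (prods ++ [x], some x) := by
        simp [pvStepB]
        intro _ h
        exact absurd h.symm hx
      have hne' : prods ++ [x] ≠ [] := by simp
      have := ih (prods ++ [x]) x hne'
      simp only [List.foldl_cons, hB] at *
      rw [this]
      have htk : ((x :: t).takeWhile (fun y => y = a)) = [] := by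
        simp [hx]
      have hdw : ((x :: t).dropWhile (fun y => y = a)) = x :: t := by
        simp [hx]
      rw [htk, hdw, pvSpec]
      simp [dropLast_append_getLast prods hne, pow_succ, mul_comm]

-- the inner scan of B computes (start of run) + (length of the run's tail)
lemma pvInnerB_eq (l : List Int) (hd : Int) : ∀ (fuel j : Nat), l.length ≤ fuel + j →
    pvInnerB l hd fuel j = j + ((l.drop j).takeWhile (fun x => x = hd)).length := by
  intro fuel
  induction fuel with
  | zero =>
    intro j hf
    simp only [pvInnerB]
    simp [List.drop_eq_nil_of_le (by omega : l.length ≤ j)]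
  | succ n ih =>
    intro j hf
    simp only [pvInnerB]
    by_cases hjl : j < l.length
    · have hdrop : l.drop j = l.getD j 0 :: l.drop (j + 1) := by
        rw [List.getD_eq_getElem _ _ hjl]
        exact (List.getElem_cons_drop hjl).symm
      by_cases hv : l.getD j 0 = hd
      · have hv' : l[j]?.getD 0 = hd := by simpa [List.getD] using hv
        rw [if_pos ⟨hjl, hv⟩, ih (j + 1) (by omega), hdrop]
        simp [hv']
        omega
      · have hv' : ¬ l[j]?.getD 0 = hd := by simpa [List.getD] using hv
        rw [if_neg (by tauto), hdrop]
        simp [hv']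
    · rw [if_neg (by tauto)]
      simp [List.drop_eq_nil_of_le (by omega : l.length ≤ j)]

-- invariant of B's outer loop
lemma pvOuterB_spec (l : List Int) : ∀ (fuel i : Nat) (out : List Int), l.length ≤ fuel + i →
    pvOuterB l fuel out i
      = out ++ pvSpec (l.drop i)
        ++ List.replicate (l.length - (out.length + (pvSpec (l.drop i)).length)) 1 := by
  intro fuel
  induction fuel with
  | zero =>
    intro i out hf
    simp only [pvOuterB]
    simp [List.drop_eq_nil_of_le (by omega : l.length ≤ i), pvSpec_nil]
  | succ n ih =>
    intro i out hf
    simp only [pvOuterB]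
    by_cases h : i < l.length
    · rw [if_pos h]
      have hdrop : l.drop i = l.getD i 0 :: l.drop (i + 1) := by
        rw [List.getD_eq_getElem _ _ h]
        exact (List.getElem_cons_drop h).symm
      set a := l.getD i 0 with ha
      have hj : pvInnerB l a l.length (i + 1)
          = i + 1 + ((l.drop (i + 1)).takeWhile (fun x => x = a)).length :=
        pvInnerB_eq l a l.length (i + 1) (by omega)
      set m := ((l.drop (i + 1)).takeWhile (fun x => x = a)).length with hm
      have hmlen : m ≤ (l.drop (i + 1)).length := by
        rw [hm]; exact (List.takeWhile_sublist _).length_le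
      have hdl : (l.drop (i + 1)).length = l.length - (i + 1) := by simp
      have hspec : pvSpec (l.drop i)
          = a ^ (m + 1) :: pvSpec ((l.drop (i + 1)).dropWhile (fun x => x = a)) := by
        rw [hdrop, pvSpec]
      have h1 : List.drop (i + 1 + m) l = List.drop m (List.drop (i + 1) l) := by
        rw [List.drop_drop]
      have hdw : l.drop (pvInnerB l a l.length (i + 1)) = (l.drop (i + 1)).dropWhile (fun x => x = a) := by
        rw [hj, h1, hm, drop_length_takeWhile]
      have hrec := ih (pvInnerB l a l.length (i + 1))
        (out ++ [a ^ (pvInnerB l a l.length (i + 1) - i)]) (by rw [hj]; omega)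
      rw [hrec, hdw]
      have hpow : pvInnerB l a l.length (i + 1) - i = m + 1 := by rw [hj]; omega
      rw [hpow, hspec]
      simp [List.append_assoc]
      omega
    · rw [if_neg h]
      simp [List.drop_eq_nil_of_le (by omega : l.length ≤ i), pvSpec_nil]

-- ===== VERDICT (by name: the statement is the Claim_ definition above) =====
theorem separate_dubles_spec : Claim_equal_separate_dubles := by
  intro l _ hpre
  cases l with
  | nil => exact absurd rfl hpre
  | cons x xs =>
    show separate_dubles (x :: xs) = separate_dubles_alt (x :: xs)
    have hfirstA : pvStepA (List.replicate (x :: xs).length 1, 0, x) x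
        = ([x] ++ List.replicate ((x :: xs).length - 1) 1, 0, x) := by
      simp [pvStepA, List.replicate_succ, List.getD]
    have hfold := fold_pvStepB_spec xs [x] x (by simp)
    have hB := pvOuterB_spec (x :: xs) ((x :: xs).length + 1) 0 [] (by simp)
    have hlr := loop_rel xs [x] ((x :: xs).length - 1) x (by simp) (by simp)
    norm_num at hlr
    have hspec : pvSpec (x :: xs)
        = x ^ ((xs.takeWhile (fun y => y = x)).length + 1)
            :: pvSpec (xs.dropWhile (fun y => y = x)) := by
      rw [pvSpec]
    have hfold' : (xs.foldl pvStepB ([x], some x)).1 = pvSpec (x :: xs) := by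
      rw [hfold, hspec]
      simp [pow_succ, mul_comm]
    have hA' : separate_dubles (x :: xs)
        = pvSpec (x :: xs) ++ List.replicate (1 + xs.length - (pvSpec (x :: xs)).length) 1 := by
      simp only [separate_dubles, List.foldl_cons, hfirstA]
      norm_num
      rw [hlr, hfold']
    have hB' : separate_dubles_alt (x :: xs)
        = pvSpec (x :: xs) ++ List.replicate ((x :: xs).length - (pvSpec (x :: xs)).length) 1 := by
      simpa [separate_dubles_alt] using hB
    rw [hA', hB']
    congr 2
    simp only [List.length_cons]
    omega
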